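-- pv_equiv track=rewrite | github.com/skulkarni3/wids-usf-beacon | app/services/chat_store.py | _trim_to_last_turns
-- ===== SOURCE A (Python) =====
-- def _trim_to_last_turns(reduced_history: list[dict[str, str]], last_turns: int) -> list[dict[str, str]]:
--     if last_turns <= 0:
--         return []
--
--     user_indices = [i for i, m in enumerate(reduced_history) if m.get("role") == "user"]
--     if len(user_indices) <= last_turns:
--         return reduced_history
--
--     keep_from = user_indices[-last_turns]
--     return reduced_history[keep_from:]
-- ===== SOURCE B (Python) =====
-- def _trim_to_last_turns(reduced_history: list[dict[str, str]], last_turns: int) -> list[dict[str, str]]: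
--     if last_turns <= 0:
--         return []
--     seen = 0
--     cut = 0
--     for i in range(len(reduced_history) - 1, -1, -1):
--         if reduced_history[i].get("role") == "user":
--             if seen == last_turns:
--                 return reduced_history[cut:]
--             seen += 1
--             cut = i
--     return reduced_history
-- ===== Notes on version B (the rewrite author's own statement) =====
-- stated objective: simpler
-- what changed: Replaces the build-a-list-of-all-user-indices pass plus negative indexing with a single reversed index scan that counts user messages from the end and slices at the recorded cut index, returning early once a (last_turns+1)-th user message is seen.
import Mathlib
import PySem

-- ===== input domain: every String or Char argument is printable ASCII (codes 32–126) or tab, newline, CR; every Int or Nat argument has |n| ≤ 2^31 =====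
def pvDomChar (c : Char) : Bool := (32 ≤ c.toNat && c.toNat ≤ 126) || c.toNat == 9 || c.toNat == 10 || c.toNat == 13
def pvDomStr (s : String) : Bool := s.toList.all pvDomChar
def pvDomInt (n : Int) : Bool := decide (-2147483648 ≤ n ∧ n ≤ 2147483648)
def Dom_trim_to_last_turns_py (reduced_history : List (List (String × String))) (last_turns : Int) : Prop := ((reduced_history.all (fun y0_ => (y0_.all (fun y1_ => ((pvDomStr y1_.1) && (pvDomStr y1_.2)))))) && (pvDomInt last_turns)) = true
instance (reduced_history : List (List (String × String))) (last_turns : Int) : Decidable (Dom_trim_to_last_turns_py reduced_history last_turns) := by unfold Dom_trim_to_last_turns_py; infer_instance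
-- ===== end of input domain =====

-- B replaces A's list-of-all-user-indices pass + negative indexing by one reversed index scan
-- with a counter and a cut index (objective: simpler). Return-VALUE equivalence only: where A
-- returns `reduced_history` itself, B returns an equal list (possibly not the same object).

-- m.get("role") == "user"  (dict as association list; lookup = first match)
def pvIsUser (m : List (String × String)) : Bool := m.lookup "role" == some "user"

-- ===== PORT A =====
def trim_to_last_turns_py (reduced_history : List (List (String × String))) (last_turns : Int) : List (List (String × String)) :=
  if last_turns ≤ 0 then []
  else
    let user_indices : List Int :=
      ((PySem.List.enumerate reduced_history).filter (fun p => pvIsUser p.2)).map (·.1)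
    if (user_indices.length : Int) ≤ last_turns then reduced_history
    else
      -- user_indices[-last_turns]: in range here (length > last_turns ≥ 1), so no IndexError
      let keep_from := (PySem.List.pyGet? user_indices (-last_turns)).getD 0
      PySem.List.slice reduced_history (some keep_from) none

-- ===== PORT B =====
-- the for-loop of Source B over range(len(rh)-1, -1, -1), with early return; indices from
-- List.range are in range, so rh.getD i [] is exactly reduced_history[i]
def pvAltGo (rh : List (List (String × String))) (lt : Int) :
    List Nat → Int → Nat → List (List (String × String))
  | [], _, _ => rh
  | i :: rest, seen, cut =>
    if pvIsUser (rh.getD i []) then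
      if seen == lt then rh.drop cut   -- reduced_history[cut:], cut ≥ 0
      else pvAltGo rh lt rest (seen + 1) i
    else pvAltGo rh lt rest seen cut

def trim_to_last_turns_py_alt (reduced_history : List (List (String × String))) (last_turns : Int) : List (List (String × String)) :=
  if last_turns ≤ 0 then []
  else pvAltGo reduced_history last_turns (List.range reduced_history.length).reverse 0 0

-- ===== PRECONDITION & SPEC =====
def Spec_trim_to_last_turns_py (reduced_history : List (List (String × String))) (last_turns : Int) (out : List (List (String × String))) : Prop := out = trim_to_last_turns_py_alt reduced_history last_turns
instance (reduced_history : List (List (String × String))) (last_turns : Int) (out : List (List (String × String))) : Decidable (Spec_trim_to_last_turns_py reduced_history last_turns out) := by unfold Spec_trim_to_last_turns_py; infer_instance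

-- ===== CLAIM (what is proved, stated in full; the proofs are below) =====
def Claim_equal_trim_to_last_turns_py : Prop := ∀ (reduced_history : List (List (String × String))) (last_turns : Int), Dom_trim_to_last_turns_py reduced_history last_turns → Spec_trim_to_last_turns_py reduced_history last_turns (trim_to_last_turns_py reduced_history last_turns)

-- ===== LEMMAS AND PROOFS =====

-- the ascending list of user-message indices of rh
def pvU (rh : List (List (String × String))) : List Nat :=
  (List.range rh.length).filter (fun i => pvIsUser (rh.getD i []))

-- number of user-message indices ≥ i
def pvCF (rh : List (List (String × String))) (i : Nat) : Nat :=
  ((List.range' i (rh.length - i)).filter (fun j => pvIsUser (rh.getD j []))).length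

lemma pv_range_split {n i : Nat} (h : i ≤ n) :
    List.range n = List.range i ++ List.range' i (n - i) := by
  rw [List.range_eq_range', List.range_eq_range']
  rw [show List.range' 0 i = List.range' 0 i 1 from rfl,
      show List.range' i (n-i) = List.range' (0 + 1*i) (n-i) 1 by ring_nf,
      List.range'_append, Nat.add_sub_cancel' h]

lemma pvU_split (rh : List (List (String × String))) {i : Nat} (h : i ≤ rh.length) :
    pvU rh = ((List.range i).filter (fun j => pvIsUser (rh.getD j []))) ++
             ((List.range' i (rh.length - i)).filter (fun j => pvIsUser (rh.getD j []))) := by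
  rw [pvU, pv_range_split h, List.filter_append]

-- key normal form of A
lemma trimA_eq (rh : List (List (String × String))) (lt : Int) :
    trim_to_last_turns_py rh lt =
      if lt ≤ 0 then []
      else if ((pvU rh).length : Int) ≤ lt then rh
      else rh.drop ((pvU rh).getD ((pvU rh).length - lt.toNat) 0) := by
  unfold trim_to_last_turns_py
  by_cases h0 : lt ≤ 0
  · simp [h0]
  · simp only [h0, if_false]
    have hui : ((PySem.List.enumerate rh).filter (fun p => pvIsUser p.2)).map (·.1)
        = (pvU rh).map (fun i : Nat => (i : Int)) := by
      rw [PySem.List.enumerate_eq_map_pyRange rh []]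
      rw [show PySem.List.len rh = ((rh.length : Int)) from rfl,
          PySem.List.pyRange_zero_natCast, List.map_map, List.filter_map, List.map_map, pvU]
      have hpred : ((fun p : Int × List (String × String) => pvIsUser p.2) ∘
          (fun j => (j, PySem.List.pyGetD rh j ([] : List (String × String)))) ∘ (fun k : Nat => (k : Int)))
          = (fun i : Nat => pvIsUser (rh.getD i [])) := by
        funext k; simp [Function.comp, PySem.List.pyGetD_natCast]
      rw [hpred]
      rfl
    rw [hui]
    simp only [List.length_map]
    by_cases hle : ((pvU rh).length : Int) ≤ lt
    · simp [hle]
    · simp only [hle, if_false]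
      have hk1 : 0 < lt.toNat := by omega
      have hk2 : lt.toNat ≤ (List.map (fun i : Nat => (i : Int)) (pvU rh)).length := by
        simp; omega
      have hneg : -lt = -((lt.toNat : Nat) : Int) := by omega
      rw [hneg, PySem.List.pyGet?_neg_natCast _ _ hk1 hk2]
      have hlt : (List.map (fun i : Nat => (i : Int)) (pvU rh)).length - lt.toNat < (pvU rh).length := by
        simp at hk2 ⊢; omega
      rw [List.getElem?_eq_getElem (by simpa using hlt)]
      simp only [List.length_map, List.getElem_map, Option.getD_some]
      rw [PySem.List.slice_from_natCast]
      congr 1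
      rw [List.getD_eq_getElem _ _ (by omega)]

-- main loop invariant for B's reversed scan
lemma pvAltGo_eq (rh : List (List (String × String))) (lt : Int) (hlt : 1 ≤ lt) :
    ∀ (i : Nat), i ≤ rh.length → ∀ (seen : Int) (cut : Nat),
      seen = (pvCF rh i : Int) →
      (pvCF rh i : Int) ≤ lt →
      (seen = lt → cut = (pvU rh).getD ((pvU rh).length - lt.toNat) 0) →
      pvAltGo rh lt (List.range i).reverse seen cut =
        if ((pvU rh).length : Int) ≤ lt then rh
        else rh.drop ((pvU rh).getD ((pvU rh).length - lt.toNat) 0) := by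
  intro i
  induction i with
  | zero =>
    intro _ seen cut hseen hle _
    have hT : pvCF rh 0 = (pvU rh).length := by
      rw [pvCF, pvU]; rw [pv_range_split (Nat.zero_le rh.length)]; simp
    have : ((pvU rh).length : Int) ≤ lt := by rw [← hT]; exact hle
    simp [pvAltGo, this]
  | succ i ih =>
    intro hin seen cut hseen hle hcut
    have hi : i ≤ rh.length := by omega
    have hrev : (List.range (i+1)).reverse = i :: (List.range i).reverse := by
      rw [List.range_succ]; simp
    have hrange' : List.range' i (rh.length - i) = i :: List.range' (i+1) (rh.length - (i+1)) := by
      rw [show rh.length - i = (rh.length - (i+1)) + 1 by omega, List.range'_succ]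
    rw [hrev]
    by_cases hp : pvIsUser (rh.getD i []) = true
    · -- index i is a user message: pvCF rh i = pvCF rh (i+1) + 1
      have hcf : pvCF rh i = pvCF rh (i+1) + 1 := by
        have hp' : pvIsUser (rh[i]?.getD []) = true := by simpa [List.getD] using hp
        rw [pvCF, pvCF, hrange']; simp [hp']
      -- i is exactly the element of pvU at position (pvU).length - pvCF rh i
      have hpos : (pvU rh).getD (((List.range i).filter (fun j => pvIsUser (rh.getD j []))).length) 0 = i := by
        rw [pvU_split rh hi, hrange']
        simp only [List.filter_cons, hp, if_true]
        rw [List.getD_eq_getElem _ _ (by simp), List.getElem_append_right le_rfl]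
        simp
      have hlen : (pvU rh).length = ((List.range i).filter (fun j => pvIsUser (rh.getD j []))).length + pvCF rh i := by
        rw [pvU_split rh hi, List.length_append, pvCF]
      simp only [pvAltGo, hp, if_true]
      by_cases hs : seen = lt
      · have hbeq : (seen == lt) = true := by simp [hs]
        rw [hbeq, if_pos rfl, hcut hs]
        have : ¬ ((pvU rh).length : Int) ≤ lt := by
          have h1 : (pvCF rh (i+1) : Int) = lt := by omega
          omega
        simp [this]
      · have hbeq : (seen == lt) = false := by simp [hs]
        rw [hbeq]
        simp only [Bool.false_eq_true, if_false]
        apply ih hi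
        · omega
        · omega
        · intro hs1
          have hklt : lt.toNat = pvCF rh i := by omega
          rw [hklt, hlen, Nat.add_sub_cancel]
          exact hpos.symm
    · have hcf : pvCF rh i = pvCF rh (i+1) := by
        have hp' : ¬ pvIsUser (rh[i]?.getD []) = true := by simpa [List.getD] using hp
        rw [pvCF, pvCF, hrange']
        simp [hp']
      simp only [pvAltGo, hp, Bool.false_eq_true, if_false]
      apply ih hi <;> [omega; omega; skip]
      intro hs; exact hcut hs

-- key normal form of B (same right-hand side as trimA_eq)
lemma trimB_eq (rh : List (List (String × String))) (lt : Int) :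
    trim_to_last_turns_py_alt rh lt =
      if lt ≤ 0 then []
      else if ((pvU rh).length : Int) ≤ lt then rh
      else rh.drop ((pvU rh).getD ((pvU rh).length - lt.toNat) 0) := by
  unfold trim_to_last_turns_py_alt
  by_cases h0 : lt ≤ 0
  · simp [h0]
  · simp only [h0, if_false]
    have hcfn : pvCF rh rh.length = 0 := by simp [pvCF]
    exact pvAltGo_eq rh lt (by omega) rh.length le_rfl 0 0 (by rw [hcfn]; rfl)
      (by rw [hcfn]; omega) (by intro h; omega)

-- ===== VERDICT (by name: the statement is the Claim_ definition above) =====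
theorem trim_to_last_turns_py_spec : Claim_equal_trim_to_last_turns_py := by
  intro rh lt _
  unfold Spec_trim_to_last_turns_py
  rw [trimA_eq, trimB_eq]
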